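-- pv_equiv track=rewrite | github.com/Ludoviccccc/IMGEPforMCPusingLLMs | mcpu.py | simulate_dual_core
-- ===== SOURCE A (Python) =====
-- import queue
--
-- def simulate_dual_core(core1_code, core2_code):
--     instruction_times = {"LOAD": 2, "STORE": 2, "ADD": 1, "SUB": 1, "MUL": 3, "DIV": 4}
--     shared_resource_penalty = 2  # Extra cycles if both cores access shared resources
--
--     core1_queue = queue.Queue()
--     core2_queue = queue.Queue()
--     core1_time = 0
--     core2_time = 0
--
--     # Load instructions into respective core queues
--     for instruction in core1_code:
--         parts = instruction.split()
--         if parts[0] in instruction_times: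
--             core1_queue.put((parts[0], instruction_times[parts[0]]))
--
--     for instruction in core2_code:
--         parts = instruction.split()
--         if parts[0] in instruction_times:
--             core2_queue.put((parts[0], instruction_times[parts[0]]))
--
--     # Simulate execution in parallel with shared resource contention
--     while not core1_queue.empty() or not core2_queue.empty():
--         core1_instr = core1_queue.get() if not core1_queue.empty() else (None, 0)
--         core2_instr = core2_queue.get() if not core2_queue.empty() else (None, 0)
--
--         core1_op, core1_cycles = core1_instr
--         core2_op, core2_cycles = core2_instr
--
--         # Detect shared resource usage and apply penalties
--         if core1_op in ["LOAD", "STORE"] and core2_op in ["LOAD", "STORE"]: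
--             core1_cycles += shared_resource_penalty
--             core2_cycles += shared_resource_penalty
--         elif core1_op in ["MUL", "DIV"] and core2_op in ["MUL", "DIV"]:
--             core1_cycles += shared_resource_penalty
--             core2_cycles += shared_resource_penalty
--
--         core1_time += core1_cycles
--         core2_time += core2_cycles
--
--     return core1_time, core2_time
-- ===== SOURCE B (Python) =====
-- def simulate_dual_core(core1_code, core2_code):
--     times = {"LOAD": 2, "STORE": 2, "ADD": 1, "SUB": 1, "MUL": 3, "DIV": 4}
--
--     def ops(code):
--         named = (instr.split()[0] for instr in code)
--         return [(op, times[op]) for op in named if op in times]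
--
--     def kind(op):
--         if op in ("LOAD", "STORE"):
--             return "mem"
--         if op in ("MUL", "DIV"):
--             return "mul"
--         return "other"
--
--     ops1 = ops(core1_code)
--     ops2 = ops(core2_code)
--     base1 = sum(c for _, c in ops1)
--     base2 = sum(c for _, c in ops2)
--     clashes = sum(1 for (a, _), (b, _) in zip(ops1, ops2)
--                   if kind(a) == kind(b) and kind(a) != "other")
--     return base1 + 2 * clashes, base2 + 2 * clashes
-- ===== Notes on version B (the rewrite author's own statement) =====
-- stated objective: simpler
-- what changed: Replaced A's Queue-draining lock-step simulation loop with three independent passes: filter each core's valid ops, sum base cycle costs separately, then count contention positions over zip(ops1, ops2) and add 2*count to each total.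
import Mathlib
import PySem

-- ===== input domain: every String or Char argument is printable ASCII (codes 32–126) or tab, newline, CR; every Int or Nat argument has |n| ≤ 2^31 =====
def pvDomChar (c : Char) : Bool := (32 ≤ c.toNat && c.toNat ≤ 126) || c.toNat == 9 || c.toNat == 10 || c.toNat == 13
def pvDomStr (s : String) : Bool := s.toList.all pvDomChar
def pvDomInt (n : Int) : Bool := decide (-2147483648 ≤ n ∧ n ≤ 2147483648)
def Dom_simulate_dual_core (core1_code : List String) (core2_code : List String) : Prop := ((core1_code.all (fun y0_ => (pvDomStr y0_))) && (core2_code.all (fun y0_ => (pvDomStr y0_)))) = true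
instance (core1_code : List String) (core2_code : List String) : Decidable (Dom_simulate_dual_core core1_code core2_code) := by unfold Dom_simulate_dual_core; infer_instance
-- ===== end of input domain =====

-- B replaces A's Queue-draining lock-step loop by separate base-cost sums plus a zip count of
-- contention positions (objective: simpler). Equivalence on the return value on Pre_ (no string
-- that splits to nothing, where A raises IndexError).

-- ===== PORT A =====

-- instruction_times = {"LOAD": 2, "STORE": 2, "ADD": 1, "SUB": 1, "MUL": 3, "DIV": 4}
def pvTimes : PySem.Dict String Int :=
  PySem.Dict.ofList [("LOAD", 2), ("STORE", 2), ("ADD", 1), ("SUB", 1), ("MUL", 3), ("DIV", 4)]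

-- the two queue-loading for-loops (parts[0] raises on an empty split: none → skipped, excluded by Pre_)
def pvLoadQueue (code : List String) : List (String × Int) :=
  code.foldl (fun q instruction =>
    match (PySem.Str.split₀ instruction).head? with
    | some p0 =>
      match pvTimes.get? p0 with
      | some c => q ++ [(p0, c)]
      | none => q
    | none => q) []

-- core*_op in ["LOAD","STORE"] / ["MUL","DIV"] with op possibly None
def pvOpMem (o : Option String) : Bool := o == some "LOAD" || o == some "STORE"
def pvOpMul (o : Option String) : Bool := o == some "MUL" || o == some "DIV"

-- the while-loop: pop from each non-empty queue, apply the contention penalty, accumulate times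
def pvRunLoop : List (String × Int) → List (String × Int) → Int → Int → Int × Int
  | [], [], t1, t2 => (t1, t2)
  | [], y :: q2, t1, t2 =>
    if pvOpMem none && pvOpMem (some y.1) then pvRunLoop [] q2 (t1 + 0 + 2) (t2 + y.2 + 2)
    else if pvOpMul none && pvOpMul (some y.1) then pvRunLoop [] q2 (t1 + 0 + 2) (t2 + y.2 + 2)
    else pvRunLoop [] q2 (t1 + 0) (t2 + y.2)
  | x :: q1, [], t1, t2 =>
    if pvOpMem (some x.1) && pvOpMem none then pvRunLoop q1 [] (t1 + x.2 + 2) (t2 + 0 + 2)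
    else if pvOpMul (some x.1) && pvOpMul none then pvRunLoop q1 [] (t1 + x.2 + 2) (t2 + 0 + 2)
    else pvRunLoop q1 [] (t1 + x.2) (t2 + 0)
  | x :: q1, y :: q2, t1, t2 =>
    if pvOpMem (some x.1) && pvOpMem (some y.1) then pvRunLoop q1 q2 (t1 + x.2 + 2) (t2 + y.2 + 2)
    else if pvOpMul (some x.1) && pvOpMul (some y.1) then pvRunLoop q1 q2 (t1 + x.2 + 2) (t2 + y.2 + 2)
    else pvRunLoop q1 q2 (t1 + x.2) (t2 + y.2)

def simulate_dual_core (core1_code : List String) (core2_code : List String) : Int × Int :=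
  pvRunLoop (pvLoadQueue core1_code) (pvLoadQueue core2_code) 0 0

-- ===== PORT B =====

-- ops(code): the valid (op, cost) pairs (instr.split()[0] raises on an empty split: excluded by Pre_)
def pvOps (code : List String) : List (String × Int) :=
  code.filterMap (fun instr =>
    match (PySem.Str.split₀ instr).head? with
    | some op =>
      match pvTimes.get? op with
      | some c => some (op, c)
      | none => none
    | none => none)

def pvKind (op : String) : String :=
  if op == "LOAD" || op == "STORE" then "mem"
  else if op == "MUL" || op == "DIV" then "mul"
  else "other"

def pvClash (p : (String × Int) × (String × Int)) : Bool :=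
  pvKind p.1.1 == pvKind p.2.1 && !(pvKind p.1.1 == "other")

def simulate_dual_core_alt (core1_code : List String) (core2_code : List String) : Int × Int :=
  let ops1 := pvOps core1_code
  let ops2 := pvOps core2_code
  let base1 := (ops1.map (fun pc => pc.2)).sum
  let base2 := (ops2.map (fun pc => pc.2)).sum
  let clashes : Int := ((ops1.zip ops2).countP (fun p => pvClash p) : Nat)
  (base1 + 2 * clashes, base2 + 2 * clashes)

-- ===== PRECONDITION & SPEC =====
-- Pre_ excludes inputs containing an empty/whitespace-only instruction string, on which
-- both A and B raise IndexError at instruction.split()[0].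
def Pre_simulate_dual_core (core1_code : List String) (core2_code : List String) : Prop :=
  (∀ s ∈ core1_code, PySem.Str.split₀ s ≠ []) ∧ (∀ s ∈ core2_code, PySem.Str.split₀ s ≠ [])
instance (core1_code : List String) (core2_code : List String) : Decidable (Pre_simulate_dual_core core1_code core2_code) := by unfold Pre_simulate_dual_core; infer_instance

def pvWitness_simulate_dual_core : List String × List String :=
  (["LOAD R1", "MUL R2 R3", "ADD"], ["STORE X", "DIV Y"])

def Spec_simulate_dual_core (core1_code : List String) (core2_code : List String) (out : Int × Int) : Prop := out = simulate_dual_core_alt core1_code core2_code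
instance (core1_code : List String) (core2_code : List String) (out : Int × Int) : Decidable (Spec_simulate_dual_core core1_code core2_code out) := by unfold Spec_simulate_dual_core; infer_instance

-- ===== CLAIM (what is proved, stated in full; the proofs are below) =====
def Claim_equal_simulate_dual_core : Prop := ∀ (core1_code : List String) (core2_code : List String), Dom_simulate_dual_core core1_code core2_code → Pre_simulate_dual_core core1_code core2_code → Spec_simulate_dual_core core1_code core2_code (simulate_dual_core core1_code core2_code)

-- ===== LEMMAS AND PROOFS =====

-- A's foldl-append queue building equals B's filterMap, modulo the common accumulator.
lemma loadQueue_aux (code : List String) (acc : List (String × Int)) :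
    code.foldl (fun q instruction =>
      match (PySem.Str.split₀ instruction).head? with
      | some p0 =>
        match pvTimes.get? p0 with
        | some c => q ++ [(p0, c)]
        | none => q
      | none => q) acc = acc ++ pvOps code := by
  induction code generalizing acc with
  | nil => simp [pvOps]
  | cons s rest ih =>
    simp only [List.foldl, pvOps, List.filterMap_cons]
    rcases h1 : (PySem.Str.split₀ s).head? with _ | p0
    · simpa [pvOps] using ih acc
    · rcases h2 : pvTimes.get? p0 with _ | c
      · simp only [h2]; simpa [pvOps] using ih acc
      · simp only [h2]
        rw [ih (acc ++ [(p0, c)])]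
        simp [pvOps]
lemma loadQueue_eq (code : List String) : pvLoadQueue code = pvOps code := by
  simpa using loadQueue_aux code []

-- the penalty condition A tests equals B's kind-based clash predicate
lemma clash_eq (a b : String) :
    pvClash ((a, (0:Int)), (b, (0:Int))) =
      ((pvOpMem (some a) && pvOpMem (some b)) || (pvOpMul (some a) && pvOpMul (some b))) := by
  simp only [pvClash, pvKind, pvOpMem, pvOpMul]
  by_cases ha1 : a = "LOAD" <;> by_cases ha2 : a = "STORE" <;>
    by_cases ha3 : a = "MUL" <;> by_cases ha4 : a = "DIV" <;>
    by_cases hb1 : b = "LOAD" <;> by_cases hb2 : b = "STORE" <;>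
    by_cases hb3 : b = "MUL" <;> by_cases hb4 : b = "DIV" <;>
    simp_all

-- pvClash only looks at the two op names
lemma clash_ops (x y : String × Int) :
    pvClash (x, y) = pvClash ((x.1, (0:Int)), (y.1, (0:Int))) := by
  simp [pvClash]

lemma runLoop_right_nil (q1 : List (String × Int)) (t1 t2 : Int) :
    pvRunLoop q1 [] t1 t2 = (t1 + (q1.map (fun pc => pc.2)).sum, t2) := by
  induction q1 generalizing t1 t2 with
  | nil => simp [pvRunLoop]
  | cons x q1 ih =>
    simp only [pvRunLoop, pvOpMem, pvOpMul]
    simp [ih, List.sum_cons]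
    ring

lemma runLoop_left_nil (q2 : List (String × Int)) (t1 t2 : Int) :
    pvRunLoop [] q2 t1 t2 = (t1, t2 + (q2.map (fun pc => pc.2)).sum) := by
  induction q2 generalizing t1 t2 with
  | nil => simp [pvRunLoop]
  | cons y q2 ih =>
    simp only [pvRunLoop, pvOpMem, pvOpMul]
    simp [ih, List.sum_cons]
    ring

lemma runLoop_eq (q1 q2 : List (String × Int)) (t1 t2 : Int) :
    pvRunLoop q1 q2 t1 t2 =
      (t1 + (q1.map (fun pc => pc.2)).sum + 2 * ((q1.zip q2).countP (fun p => pvClash p) : Nat),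
       t2 + (q2.map (fun pc => pc.2)).sum + 2 * ((q1.zip q2).countP (fun p => pvClash p) : Nat)) := by
  induction q1 generalizing q2 t1 t2 with
  | nil => simp [runLoop_left_nil]
  | cons x q1 ih =>
    cases q2 with
    | nil => simp [runLoop_right_nil]
    | cons y q2 =>
      have hc := clash_eq x.1 y.1
      have ho := clash_ops x y
      simp only [pvRunLoop]
      by_cases hm : (pvOpMem (some x.1) && pvOpMem (some y.1)) = true
      · have : pvClash (x, y) = true := by rw [ho, hc]; simp [hm]
        simp [hm, ih, this]
        constructor <;> ring
      · by_cases hl : (pvOpMul (some x.1) && pvOpMul (some y.1)) = true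
        · have : pvClash (x, y) = true := by rw [ho, hc]; simp [hl]
          simp [hm, hl, ih, this]
          constructor <;> ring
        · have : pvClash (x, y) = false := by
            rw [ho, hc]; simp only [Bool.or_eq_false_iff]
            exact ⟨by simpa using hm, by simpa using hl⟩
          simp [hm, hl, ih, this]
          constructor <;> ring

-- ===== VERDICT (by name: the statement is the Claim_ definition above) =====
theorem simulate_dual_core_spec : Claim_equal_simulate_dual_core := by
  intro c1 c2 _ _
  show simulate_dual_core c1 c2 = simulate_dual_core_alt c1 c2
  simp [simulate_dual_core, simulate_dual_core_alt, loadQueue_eq, runLoop_eq]
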